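-- pv_equiv track=rewrite | github.com/SavageCooPigeonX/keystroke-telemetry | src/template_selector.py | _unsaid_threads
-- ===== SOURCE A (Python) =====
-- def _unsaid_threads(comps):
--     """Extract intent-deleted words — thoughts operator started but killed."""
--     threads = []
--     seen = set()
--     for c in comps[-8:]:
--         for w in c.get('intent_deleted_words', []):
--             word = w.get('word', '') if isinstance(w, dict) else str(w)
--             if word and len(word) > 4 and word not in seen:
--                 threads.append(word)
--                 seen.add(word)
--     return threads
-- ===== SOURCE B (Python) =====
-- def _unsaid_threads(comps):
--     """Extract intent-deleted words — thoughts operator started but killed."""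
--     kept = [w for w in
--             ((x.get('word', '') if isinstance(x, dict) else str(x))
--              for c in comps[-8:] for x in c.get('intent_deleted_words', []))
--             if w and len(w) > 4]
--     return _dedup(kept)
--
-- def _dedup(words):
--     # recursive filter-out dedup: keep the head, drop all its later copies, recurse
--     if not words:
--         return []
--     head = words[0]
--     return [head] + _dedup([w for w in words[1:] if w != head])
-- ===== Notes on version B (the rewrite author's own statement) =====
-- stated objective: alternative
-- what changed: Replaced the single imperative nested loop with an inline seen-set by a staged comprehension pipeline (flatten, extract, filter) followed by a recursive filter-out deduplication (keep the head, delete its later copies, recurse) that uses no auxiliary set or dict.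
import Mathlib
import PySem

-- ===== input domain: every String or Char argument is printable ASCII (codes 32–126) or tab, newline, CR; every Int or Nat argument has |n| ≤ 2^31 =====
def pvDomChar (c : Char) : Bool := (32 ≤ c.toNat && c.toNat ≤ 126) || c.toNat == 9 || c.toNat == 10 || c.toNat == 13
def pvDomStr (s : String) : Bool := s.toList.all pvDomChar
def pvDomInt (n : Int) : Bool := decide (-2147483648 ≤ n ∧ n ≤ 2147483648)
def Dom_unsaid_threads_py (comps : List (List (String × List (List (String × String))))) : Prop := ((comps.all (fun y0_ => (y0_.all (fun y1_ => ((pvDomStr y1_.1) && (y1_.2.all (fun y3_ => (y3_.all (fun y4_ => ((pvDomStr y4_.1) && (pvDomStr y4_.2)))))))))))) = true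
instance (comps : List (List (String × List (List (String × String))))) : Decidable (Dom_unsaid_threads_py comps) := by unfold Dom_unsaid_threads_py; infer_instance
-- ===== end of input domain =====

-- B replaces the nested loop with an inline seen-set by a staged flatten/extract/filter
-- pipeline plus a recursive filter-out deduplication (no auxiliary set); alternative, not faster.

-- shared helper: word = w.get('word', '')  (w is always a dict under the type convention)
def pvWordOf (w : List (String × String)) : String :=
  PySem.Dict.getD (PySem.Dict.mk w) "word" ""

-- ===== PORT A =====
-- inline dedup: state (threads, seen); append iff word truthy, len > 4, and not seen
def unsaid_threads_py (comps : List (List (String × List (List (String × String))))) : List String :=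
  ((PySem.List.slice comps (some (-8)) none).foldl
      (fun (st : List String × PySem.Set String) c =>
        (PySem.Dict.getD (PySem.Dict.mk c) "intent_deleted_words" []).foldl
          (fun st w =>
            let word := pvWordOf w
            if (word != "") && (4 < PySem.Str.len word) && !(PySem.Set.contains st.2 word) then
              (st.1 ++ [word], PySem.Set.add st.2 word)
            else st)
          st)
      ([], PySem.Set.empty)).1

-- ===== PORT B =====
-- _dedup: keep the head, drop its later copies, recurse on the rest
def pvDedup : List String → List String
  | [] => []
  | x :: xs => x :: pvDedup (xs.filter (fun w => w != x))
termination_by l => l.length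
decreasing_by
  simp only [List.length_unattach]
  exact Nat.lt_succ_of_le (le_trans (List.length_filter_le _ _) (by simp))

-- staged pipeline: flatten comps[-8:]'s word entries, extract, filter, then _dedup
def unsaid_threads_py_alt (comps : List (List (String × List (List (String × String))))) : List String :=
  let kept :=
    (((PySem.List.slice comps (some (-8)) none).flatMap
        (fun c => PySem.Dict.getD (PySem.Dict.mk c) "intent_deleted_words" [])).map pvWordOf).filter
      (fun w => (w != "") && (4 < PySem.Str.len w))
  pvDedup kept

-- ===== PRECONDITION & SPEC =====
def Spec_unsaid_threads_py (comps : List (List (String × List (List (String × String))))) (out : List String) : Prop := out = unsaid_threads_py_alt comps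
instance (comps : List (List (String × List (List (String × String))))) (out : List String) : Decidable (Spec_unsaid_threads_py comps out) := by unfold Spec_unsaid_threads_py; infer_instance

-- ===== CLAIM =====
def Claim_equal_unsaid_threads_py : Prop := ∀ (comps : List (List (String × List (List (String × String))))), Dom_unsaid_threads_py comps → Spec_unsaid_threads_py comps (unsaid_threads_py comps)

-- ===== LEMMAS AND PROOFS =====

-- the per-word filter both versions apply
def pvKeep (w : List (String × String)) : Bool :=
  (pvWordOf w != "") && (4 < PySem.Str.len (pvWordOf w))

-- the qualifying words of one comp, in order
def pvColl (c : List (String × List (List (String × String)))) : List String :=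
  ((PySem.Dict.getD (PySem.Dict.mk c) "intent_deleted_words" []).filter pvKeep).map pvWordOf

-- on a state whose two components agree, A's word step is a conditional Set.add on both
theorem stepA_eq (s : PySem.Set String) (w : List (String × String)) :
    (let word := pvWordOf w
     if (word != "") && (4 < PySem.Str.len word) && !(PySem.Set.contains (s, s).2 word) then
       ((s, s).1 ++ [word], PySem.Set.add (s, s).2 word)
     else ((s, s) : List String × PySem.Set String))
    = (if pvKeep w then PySem.Set.add s (pvWordOf w) else s,
       if pvKeep w then PySem.Set.add s (pvWordOf w) else s) := by
  unfold pvKeep PySem.Set.add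
  by_cases hm : pvWordOf w ∈ s
  · simp [hm]
  · simp [hm]
    split_ifs <;> rfl

-- A's inner loop keeps the invariant "seen = threads" and folds Set.add over the kept words
theorem innerA_eq (ws : List (List (String × String))) (s : PySem.Set String) :
    ws.foldl
      (fun (st : List String × PySem.Set String) w =>
        let word := pvWordOf w
        if (word != "") && (4 < PySem.Str.len word) && !(PySem.Set.contains st.2 word) then
          (st.1 ++ [word], PySem.Set.add st.2 word)
        else st)
      (s, s)
    = (((ws.filter pvKeep).map pvWordOf).foldl PySem.Set.add s,
       ((ws.filter pvKeep).map pvWordOf).foldl PySem.Set.add s) := by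
  induction ws generalizing s with
  | nil => rfl
  | cons w ws ih =>
    rw [List.foldl_cons]
    rw [show _ = _ from stepA_eq s w, List.filter_cons]
    by_cases hk : pvKeep w
    · rw [if_pos hk, if_pos hk, List.map_cons, List.foldl_cons]
      exact ih (PySem.Set.add s (pvWordOf w))
    · rw [if_neg hk, if_neg hk]
      exact ih s

-- A's whole loop is Set.add folded over the flattened kept words
theorem outerA_eq (L : List (List (String × List (List (String × String))))) (s : PySem.Set String) :
    L.foldl
      (fun (st : List String × PySem.Set String) c =>
        (PySem.Dict.getD (PySem.Dict.mk c) "intent_deleted_words" []).foldl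
          (fun st w =>
            let word := pvWordOf w
            if (word != "") && (4 < PySem.Str.len word) && !(PySem.Set.contains st.2 word) then
              (st.1 ++ [word], PySem.Set.add st.2 word)
            else st)
          st)
      (s, s)
    = ((L.flatMap pvColl).foldl PySem.Set.add s, (L.flatMap pvColl).foldl PySem.Set.add s) := by
  induction L generalizing s with
  | nil => rfl
  | cons c L ih =>
    rw [List.foldl_cons, innerA_eq, List.flatMap_cons, List.foldl_append]
    exact ih _

-- unfolding equation for pvDedup's cons case
theorem pvDedup_cons (x : String) (xs : List String) :
    pvDedup (x :: xs) = x :: pvDedup (xs.filter (fun w => w != x)) := by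
  simp [pvDedup]

-- folding Set.add from a seen-set s is s plus the recursive dedup of the unseen words
theorem foldl_add_eq_pvDedup (l : List String) (s : PySem.Set String) :
    l.foldl PySem.Set.add s = s ++ pvDedup (l.filter (fun x => !(decide (x ∈ s)))) := by
  induction l generalizing s with
  | nil => simp [pvDedup]
  | cons x xs ih =>
    rw [List.foldl_cons, List.filter_cons]
    by_cases hm : x ∈ s
    · have hadd : PySem.Set.add s x = s := by simp [PySem.Set.add, hm]
      simp only [hm, decide_true, Bool.not_true, if_neg (by simp : ¬ (false = true))]
      rw [hadd, ih]
    · have hadd : PySem.Set.add s x = s ++ [x] := by simp [PySem.Set.add, hm]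
      simp only [hm, decide_false, Bool.not_false, if_true]
      rw [hadd, ih, pvDedup_cons, List.filter_filter, List.append_assoc, List.cons_append,
          List.nil_append]
      congr 3
      apply List.filter_congr
      intro a _
      by_cases hax : a = x <;> by_cases has : a ∈ s <;>
        simp [hax, has]

-- B's staged pipeline collects exactly the flattened kept words
theorem pipeline_eq (L : List (List (String × List (List (String × String))))) :
    ((L.flatMap (fun c => PySem.Dict.getD (PySem.Dict.mk c) "intent_deleted_words" [])).map
        pvWordOf).filter (fun w => (w != "") && (4 < PySem.Str.len w))
    = L.flatMap pvColl := by
  induction L with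
  | nil => rfl
  | cons c L ih =>
    rw [List.flatMap_cons, List.flatMap_cons, List.map_append, List.filter_append, ih, pvColl,
        List.filter_map]
    rfl

-- ===== VERDICT =====
theorem unsaid_threads_py_spec : Claim_equal_unsaid_threads_py := by
  intro comps _
  show unsaid_threads_py comps = unsaid_threads_py_alt comps
  unfold unsaid_threads_py unsaid_threads_py_alt
  rw [show (([], PySem.Set.empty) : List String × PySem.Set String)
        = ((PySem.Set.empty : PySem.Set String), (PySem.Set.empty : PySem.Set String)) from rfl,
      outerA_eq, pipeline_eq]
  show (_ : List String).foldl PySem.Set.add PySem.Set.empty = _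
  rw [foldl_add_eq_pvDedup]
  simp [PySem.Set.empty]
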